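-- pv_equiv track=rewrite | github.com/Albertree/SOAR-ARC-test | procedural_memory/base_rules/structure/quadrant_shape_swap.py | _extract_shape
-- ===== SOURCE A (Python) =====
-- def _extract_shape(grid, r1, r2, c1, c2):
--     """Extract shape info from a cell region. Returns (bg_color, shape_positions_relative)."""
--     counts = {}
--     for r in range(r1, r2 + 1):
--         for c in range(c1, c2 + 1):
--             v = grid[r][c]
--             counts[v] = counts.get(v, 0) + 1
--
--     if not counts:
--         return None, []
--
--     bg = max(counts, key=counts.get)
--
--     positions = []
--     for r in range(r1, r2 + 1):
--         for c in range(c1, c2 + 1):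
--             if grid[r][c] != bg:
--                 positions.append((r - r1, c - c1))
--
--     return bg, positions
-- ===== SOURCE B (Python) =====
-- def _extract_shape(grid, r1, r2, c1, c2):
--     """Extract shape info from a cell region. Returns (bg_color, shape_positions_relative)."""
--     counts = {}
--     cells = []
--     for r in range(r1, r2 + 1):
--         for c in range(c1, c2 + 1):
--             v = grid[r][c]
--             counts[v] = counts.get(v, 0) + 1
--             cells.append((r - r1, c - c1, v))
--
--     if not counts:
--         return None, []
--
--     bg = max(counts, key=counts.get)
--     return bg, [(r, c) for (r, c, v) in cells if v != bg]
-- ===== Notes on version B (the rewrite author's own statement) =====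
-- stated objective: alternative
-- what changed: B scans the region once, recording a (rel_r, rel_c, value) table alongside the counts dict, and derives positions by filtering that table instead of re-scanning the grid a second time.
import Mathlib
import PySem

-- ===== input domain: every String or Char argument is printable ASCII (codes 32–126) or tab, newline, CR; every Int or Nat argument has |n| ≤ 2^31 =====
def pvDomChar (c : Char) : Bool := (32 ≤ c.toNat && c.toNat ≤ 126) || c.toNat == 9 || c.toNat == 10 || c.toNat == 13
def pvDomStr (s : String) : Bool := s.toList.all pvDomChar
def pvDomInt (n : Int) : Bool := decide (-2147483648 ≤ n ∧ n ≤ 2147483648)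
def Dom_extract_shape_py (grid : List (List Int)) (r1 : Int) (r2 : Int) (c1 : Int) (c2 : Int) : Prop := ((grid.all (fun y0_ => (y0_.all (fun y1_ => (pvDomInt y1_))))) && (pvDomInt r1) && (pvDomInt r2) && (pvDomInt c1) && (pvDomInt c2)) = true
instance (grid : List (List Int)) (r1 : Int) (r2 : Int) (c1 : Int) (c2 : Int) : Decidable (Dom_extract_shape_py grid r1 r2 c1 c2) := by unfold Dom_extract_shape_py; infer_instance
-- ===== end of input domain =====

-- B replaces A's second scan of the grid by a single row-major pass that also records a
-- (rel_r, rel_c, value) table, and filters that table for the non-background positions.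

-- ===== PORT A =====
def extract_shape_py (grid : List (List Int)) (r1 : Int) (r2 : Int) (c1 : Int) (c2 : Int) : Option Int × (List (Int × Int)) :=
  let counts : PySem.Dict Int Int :=
    (PySem.List.pyRange r1 (r2 + 1) 1).foldl (fun counts r =>
      (PySem.List.pyRange c1 (c2 + 1) 1).foldl (fun counts c =>
        let v := PySem.List.pyGetD (PySem.List.pyGetD grid r []) c 0
        counts.insert v (counts.getD v 0 + 1)) counts) PySem.Dict.empty
  if counts.size = 0 then (none, [])
  else
    let bg : Int := (PySem.List.max? counts.keys (fun k => counts.getD k 0)).getD 0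
    let positions : List (Int × Int) :=
      (PySem.List.pyRange r1 (r2 + 1) 1).foldl (fun acc r =>
        (PySem.List.pyRange c1 (c2 + 1) 1).foldl (fun acc c =>
          if PySem.List.pyGetD (PySem.List.pyGetD grid r []) c 0 ≠ bg then
            acc ++ [(r - r1, c - c1)]
          else acc) acc) []
    (some bg, positions)

-- ===== PORT B =====
def extract_shape_py_alt (grid : List (List Int)) (r1 : Int) (r2 : Int) (c1 : Int) (c2 : Int) : Option Int × (List (Int × Int)) :=
  let st : PySem.Dict Int Int × List (Int × Int × Int) :=
    (PySem.List.pyRange r1 (r2 + 1) 1).foldl (fun st r =>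
      (PySem.List.pyRange c1 (c2 + 1) 1).foldl
        (fun (st : PySem.Dict Int Int × List (Int × Int × Int)) c =>
          let v := PySem.List.pyGetD (PySem.List.pyGetD grid r []) c 0
          (st.1.insert v (st.1.getD v 0 + 1), st.2 ++ [(r - r1, c - c1, v)])) st)
      (PySem.Dict.empty, [])
  let counts := st.1
  let cells := st.2
  if counts.size = 0 then (none, [])
  else
    let bg : Int := (PySem.List.max? counts.keys (fun k => counts.getD k 0)).getD 0
    (some bg, (cells.filter (fun t => decide (t.2.2 ≠ bg))).map (fun t => (t.1, t.2.1)))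

-- ===== PRECONDITION & SPEC =====
-- Pre_ (closed form): either the region is empty, or every row index r1..r2 is a valid (possibly
-- negative) Python index into grid and every accessed row admits all column indices c1..c2 —
-- exactly the inputs where A's grid[r][c] never raises IndexError.
def Pre_extract_shape_py (grid : List (List Int)) (r1 : Int) (r2 : Int) (c1 : Int) (c2 : Int) : Prop :=
  r2 < r1 ∨ c2 < c1 ∨
    (-(grid.length : Int) ≤ r1 ∧ r2 < (grid.length : Int) ∧
      ∀ p ∈ grid.zipIdx,
        ((r1 ≤ (p.2 : Int) ∧ (p.2 : Int) ≤ r2) ∨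
            (r1 ≤ (p.2 : Int) - grid.length ∧ (p.2 : Int) - grid.length ≤ r2)) →
          -(p.1.length : Int) ≤ c1 ∧ c2 < (p.1.length : Int))
instance (grid : List (List Int)) (r1 : Int) (r2 : Int) (c1 : Int) (c2 : Int) : Decidable (Pre_extract_shape_py grid r1 r2 c1 c2) := by unfold Pre_extract_shape_py; infer_instance

def pvWitness_extract_shape_py : List (List Int) × Int × Int × Int × Int := ([[1, 2], [1, 1]], 0, 1, 0, 1)

def Spec_extract_shape_py (grid : List (List Int)) (r1 : Int) (r2 : Int) (c1 : Int) (c2 : Int) (out : Option Int × (List (Int × Int))) : Prop := out = extract_shape_py_alt grid r1 r2 c1 c2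
instance (grid : List (List Int)) (r1 : Int) (r2 : Int) (c1 : Int) (c2 : Int) (out : Option Int × (List (Int × Int))) : Decidable (Spec_extract_shape_py grid r1 r2 c1 c2 out) := by unfold Spec_extract_shape_py; infer_instance

-- ===== CLAIM (what is proved, stated in full; the proofs are below) =====
def Claim_equal_extract_shape_py : Prop := ∀ (grid : List (List Int)) (r1 : Int) (r2 : Int) (c1 : Int) (c2 : Int), Dom_extract_shape_py grid r1 r2 c1 c2 → Pre_extract_shape_py grid r1 r2 c1 c2 → Spec_extract_shape_py grid r1 r2 c1 c2 (extract_shape_py grid r1 r2 c1 c2)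

-- ===== LEMMAS AND PROOFS =====

-- a fold whose pair components evolve independently splits into two folds
theorem pvPairFold {α β : Type} (f : α → Int → α) (g : β → Int → β) :
    ∀ (l : List Int) (st : α × β),
      l.foldl (fun st c => (f st.1 c, g st.2 c)) st = (l.foldl f st.1, l.foldl g st.2) := by
  intro l
  induction l with
  | nil => intro st; rfl
  | cons c cs ih => intro st; simpa [List.foldl] using ih (f st.1 c, g st.2 c)

theorem pvPairFoldNested {α β : Type} (cols : List Int)
    (F : Int → α → Int → α) (G : Int → β → Int → β) :
    ∀ (rows : List Int) (st : α × β),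
      rows.foldl (fun st r => cols.foldl (fun st c => (F r st.1 c, G r st.2 c)) st) st
        = (rows.foldl (fun a r => cols.foldl (F r) a) st.1,
           rows.foldl (fun b r => cols.foldl (G r) b) st.2) := by
  intro rows
  induction rows with
  | nil => intro st; rfl
  | cons r rs ih =>
      intro st
      simp only [List.foldl]
      rw [pvPairFold (F r) (G r) cols st, ih]

-- one row: A's conditional append equals filtering B's recorded row
theorem pvRowEq (bg r1 c1 : Int) (val : Int → Int) (r : Int) :
    ∀ (cols : List Int) (acc : List (Int × Int)) (acl : List (Int × Int × Int)),
      acc = (acl.filter (fun t => decide (t.2.2 ≠ bg))).map (fun t => (t.1, t.2.1)) →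
      cols.foldl (fun acc c =>
          if val c ≠ bg then acc ++ [(r - r1, c - c1)] else acc) acc
        = ((cols.foldl (fun acl c => acl ++ [(r - r1, c - c1, val c)]) acl).filter
            (fun t => decide (t.2.2 ≠ bg))).map (fun t => (t.1, t.2.1)) := by
  intro cols
  induction cols with
  | nil => intro acc acl h; simpa using h
  | cons c cs ih =>
      intro acc acl h
      simp only [List.foldl]
      apply ih
      by_cases hv : val c ≠ bg
      · simp [h, List.filter_append, hv]
      · simp [h, List.filter_append, hv]

-- all rows: A's second scan equals filtering B's cell table
theorem pvPosEq (bg r1 c1 : Int) (val : Int → Int → Int) (cols : List Int) :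
    ∀ (rows : List Int) (acc : List (Int × Int)) (acl : List (Int × Int × Int)),
      acc = (acl.filter (fun t => decide (t.2.2 ≠ bg))).map (fun t => (t.1, t.2.1)) →
      rows.foldl (fun acc r => cols.foldl (fun acc c =>
          if val r c ≠ bg then acc ++ [(r - r1, c - c1)] else acc) acc) acc
        = ((rows.foldl (fun acl r => cols.foldl (fun acl c =>
              acl ++ [(r - r1, c - c1, val r c)]) acl) acl).filter
            (fun t => decide (t.2.2 ≠ bg))).map (fun t => (t.1, t.2.1)) := by
  intro rows
  induction rows with
  | nil => intro acc acl h; simpa using h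
  | cons r rs ih =>
      intro acc acl h
      simp only [List.foldl]
      exact ih _ _ (pvRowEq bg r1 c1 (val r) r cols acc acl h)

-- the concrete instance of pvPairFoldNested for the two ports' loop bodies
theorem pvSplit (grid : List (List Int)) (r1 c1 : Int) (cols : List Int) :
    ∀ (rows : List Int) (st : PySem.Dict Int Int × List (Int × Int × Int)),
      rows.foldl (fun st r => cols.foldl
          (fun (st : PySem.Dict Int Int × List (Int × Int × Int)) c =>
            (st.1.insert (PySem.List.pyGetD (PySem.List.pyGetD grid r []) c 0)
                (st.1.getD (PySem.List.pyGetD (PySem.List.pyGetD grid r []) c 0) 0 + 1),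
              st.2 ++ [(r - r1, c - c1, PySem.List.pyGetD (PySem.List.pyGetD grid r []) c 0)])) st) st
        = (rows.foldl (fun counts r => cols.foldl (fun counts c =>
              counts.insert (PySem.List.pyGetD (PySem.List.pyGetD grid r []) c 0)
                (counts.getD (PySem.List.pyGetD (PySem.List.pyGetD grid r []) c 0) 0 + 1)) counts) st.1,
           rows.foldl (fun acl r => cols.foldl (fun acl c =>
              acl ++ [(r - r1, c - c1, PySem.List.pyGetD (PySem.List.pyGetD grid r []) c 0)]) acl) st.2) := by
  intro rows st
  exact pvPairFoldNested cols
    (fun r a c => a.insert (PySem.List.pyGetD (PySem.List.pyGetD grid r []) c 0)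
        (a.getD (PySem.List.pyGetD (PySem.List.pyGetD grid r []) c 0) 0 + 1))
    (fun r b c => b ++ [(r - r1, c - c1, PySem.List.pyGetD (PySem.List.pyGetD grid r []) c 0)])
    rows st

-- ===== VERDICT (by name: the statement is the Claim_ definition above) =====
theorem extract_shape_py_spec : Claim_equal_extract_shape_py := by
  intro grid r1 r2 c1 c2 _ _
  unfold Spec_extract_shape_py extract_shape_py extract_shape_py_alt
  dsimp only
  rw [pvSplit grid r1 c1 (PySem.List.pyRange c1 (c2 + 1) 1) (PySem.List.pyRange r1 (r2 + 1) 1)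
        (PySem.Dict.empty, [])]
  dsimp only
  split
  · rfl
  · refine Prod.ext rfl ?_
    exact pvPosEq _ r1 c1 (fun r c => PySem.List.pyGetD (PySem.List.pyGetD grid r []) c 0)
      (PySem.List.pyRange c1 (c2 + 1) 1) (PySem.List.pyRange r1 (r2 + 1) 1) [] [] rfl
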